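-- pv_equiv track=rewrite | github.com/pypi-data/pypi-mirror-386 | packages/xmllens/xmllens-0.1.3.tar.gz/xmllens-0.1.3/xmllens/core.py | _match_xpath_pattern
-- ===== SOURCE A (Python) =====
-- def _match_xpath_pattern(pattern: str, path: str) -> bool:
--     """
--     Match an XPath-like pattern to an XML element path.
--
--     Supports:
--       - [n] : numeric index (strict if specified)
--       - *   : wildcard tag name
--       - //  : recursive descent
--     """
--
--     pattern = pattern.strip()
--     path = path.strip()
--
--     # Split into tokens
--     pattern_parts = [p for p in pattern.split("/") if p]
--     path_parts = [p for p in path.split("/") if p]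
--
--     def split_token(token: str):
--         """Return (tag, index) tuple, where index may be None."""
--         if "[" in token and token.endswith("]"):
--             tag, idx = token[:-1].split("[", 1)
--             return tag, idx
--         return token, None
--
--     def token_match(pat_token: str, path_token: str) -> bool:
--         """Compare tokens with wildcard and optional index."""
--         if pat_token == "*":
--             return True
--
--         pat_tag, pat_idx = split_token(pat_token)
--         path_tag, path_idx = split_token(path_token)
--
--         # Tag names must match
--         if pat_tag != path_tag:
--             return False
--
--         # If pattern specifies index, enforce equality
--         if pat_idx is not None:
--             return pat_idx == path_idx
--
--         # Otherwise, index can be anything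
--         return True
--
--     def match_from(i_pat: int, i_path: int) -> bool:
--         """Recursive matcher that supports //."""
--         while i_pat < len(pattern_parts):
--             part = pattern_parts[i_pat]
--
--             # Handle recursive descent
--             if part == "//":
--                 if i_pat + 1 == len(pattern_parts):
--                     # trailing // matches everything
--                     return True
--                 next_part = pattern_parts[i_pat + 1]
--                 for j in range(i_path, len(path_parts)):
--                     if token_match(next_part, path_parts[j]):
--                         if match_from(i_pat + 2, j + 1):
--                             return True
--                 return False
--
--             if i_path >= len(path_parts):
--                 return False
--
--             if not token_match(part, path_parts[i_path]):
--                 return False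
--
--             i_pat += 1
--             i_path += 1
--
--         return i_path == len(path_parts)
--
--     # If pattern starts with //, match anywhere
--     if pattern.startswith("//"):
--         sub_pattern = pattern[2:]
--         for i in range(len(path_parts)):
--             sub_path = "/" + "/".join(path_parts[i:])
--             if _match_xpath_pattern(sub_pattern, sub_path):
--                 return True
--         return False
--
--     return match_from(0, 0)
-- ===== SOURCE B (Python) =====
-- def _split_token(token: str):
--     """Return (tag, index) tuple, where index may be None."""
--     if "[" in token and token.endswith("]"):
--         tag, idx = token[:-1].split("[", 1)
--         return tag, idx
--     return token, None
--
--
-- def _token_match(pat_token: str, path_token: str) -> bool: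
--     """Compare tokens with wildcard and optional index."""
--     if pat_token == "*":
--         return True
--     pat_tag, pat_idx = _split_token(pat_token)
--     path_tag, path_idx = _split_token(path_token)
--     if pat_tag != path_tag:
--         return False
--     if pat_idx is not None:
--         return pat_idx == path_idx
--     return True
--
--
-- def _match_xpath_pattern(pattern: str, path: str) -> bool:
--     pattern = pattern.strip()
--     descend = False
--     while pattern.startswith("//"):
--         descend = True
--         pattern = pattern[2:].lstrip()
--     pattern_parts = [p for p in pattern.split("/") if p]
--     path_parts = [p for p in path.strip().split("/") if p]
--     if descend:
--         k = len(pattern_parts)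
--         if not (1 <= k <= len(path_parts)):
--             return False
--         tail = path_parts[len(path_parts) - k:]
--         return all(_token_match(p, q) for p, q in zip(pattern_parts, tail))
--     if len(pattern_parts) != len(path_parts):
--         return False
--     return all(_token_match(p, q) for p, q in zip(pattern_parts, path_parts))
-- ===== Notes on version B (the rewrite author's own statement) =====
-- stated objective: simpler
-- what changed: Replaces A's recursive descent (which handles a leading '//' by rebuilding '/'+'/'.join(suffix) strings for every path suffix and recursing on them, plus an index-based match_from recursion) with a flat decision: peel the leading '//' marker off the pattern, tokenize once, and answer with a single length check plus one token-wise comparison (against the whole token list, or against its k-token tail for recursive descent). …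
-- outside the precondition, e.g. on _match_xpath_pattern('//a', 'x/a /'): A returns True, B returns False
import Mathlib
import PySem

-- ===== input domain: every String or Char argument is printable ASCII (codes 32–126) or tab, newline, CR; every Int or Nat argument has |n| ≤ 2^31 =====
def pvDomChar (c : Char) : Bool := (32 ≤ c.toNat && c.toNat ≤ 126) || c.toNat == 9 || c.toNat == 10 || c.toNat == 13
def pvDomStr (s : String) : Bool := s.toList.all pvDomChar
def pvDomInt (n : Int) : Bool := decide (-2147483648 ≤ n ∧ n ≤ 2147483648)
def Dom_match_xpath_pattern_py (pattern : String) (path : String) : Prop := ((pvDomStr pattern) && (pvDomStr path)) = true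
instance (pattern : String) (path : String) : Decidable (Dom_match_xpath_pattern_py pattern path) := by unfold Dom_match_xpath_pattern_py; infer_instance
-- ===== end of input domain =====

-- B replaces A's recursive descent (string rebuilding per '//' plus an index recursion) by one
-- tokenization and a single (suffix) token-wise comparison; equal to A on Pre_ (objective: simpler).

-- ===== PORT A =====
-- helpers shared verbatim by Source A and Source B (split_token / token_match / token lists)

-- split_token: "[" in token and token.endswith("]") → (token[:-1].split("[",1)); else (token, None)
def pvSplitToken (token : List Char) : List Char × Option (List Char) :=
  if PySem.Chars.isIn ['['] token && PySem.Chars.endswith token [']'] then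
    -- token[:-1].split("[", 1): exactly two pieces here since '[' occurs in token[:-1]
    let parts := PySem.Chars.splitOnMax (PySem.Chars.slice token none (some (-1))) ['['] 1
    (parts.getD 0 [], some (parts.getD 1 []))
  else (token, none)

def pvTokenMatch (patTok pathTok : List Char) : Bool :=
  if patTok = ['*'] then true
  else
    let pt := pvSplitToken patTok
    let qt := pvSplitToken pathTok
    if pt.1 ≠ qt.1 then false
    else match pt.2 with
      | some i => decide (qt.2 = some i)
      | none => true

-- [p for p in s.split("/") if p]
def pvToks (s : List Char) : List (List Char) :=
  (PySem.Chars.splitOn s ['/']).filter (fun p => p ≠ [])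

-- needed by the ports' termination proofs
theorem pvStripLenLe (s : List Char) : (PySem.Chars.strip s).length ≤ s.length := by
  simp only [PySem.Chars.strip, PySem.Chars.rstrip, PySem.Chars.lstrip, List.length_reverse]
  calc ((PySem.Chars.isspace · ) |> fun p => ((s.dropWhile PySem.Chars.isspace).reverse.dropWhile PySem.Chars.isspace)).length
      ≤ (s.dropWhile PySem.Chars.isspace).reverse.length := List.length_dropWhile_le _ _
    _ ≤ s.length := by simpa using List.length_dropWhile_le PySem.Chars.isspace s

theorem pvLstripLenLe (s : List Char) : (PySem.Chars.lstrip s).length ≤ s.length := by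
  simp only [PySem.Chars.lstrip]
  exact List.length_dropWhile_le _ _

-- match_from's while loop / '//' branch, literal (the '//' branch is ported though unreachable)
def pvMatchFrom (pats Q : List (List Char)) (ipat ipath : Nat) : Bool :=
  if h : ipat < pats.length then
    let part := pats.getD ipat []
    if part = ['/', '/'] then
      if ipat + 1 = pats.length then true
      else
        let next := pats.getD (ipat + 1) []
        (List.range' ipath (Q.length - ipath)).any (fun j =>
          pvTokenMatch next (Q.getD j []) && pvMatchFrom pats Q (ipat + 2) (j + 1))
    else
      if Q.length ≤ ipath then false
      else if ¬ pvTokenMatch part (Q.getD ipath []) then false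
      else pvMatchFrom pats Q (ipat + 1) (ipath + 1)
  else decide (ipath = Q.length)
termination_by pats.length - ipat
decreasing_by all_goals omega

-- the top-level recursion of A (on char lists; pattern[2:] is List.drop 2)
def pvMatchRecA (pat path : List Char) : Bool :=
  let pat' := PySem.Chars.strip pat
  let path' := PySem.Chars.strip path
  let pats := pvToks pat'
  let Q := pvToks path'
  if PySem.Chars.startswith pat' ['/', '/'] then
    (List.range Q.length).any (fun i =>
      pvMatchRecA (pat'.drop 2) ('/' :: PySem.Chars.join ['/'] (Q.drop i)))
  else pvMatchFrom pats Q 0 0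
termination_by pat.length
decreasing_by
  have h1 := pvStripLenLe pat
  have h2 : 2 ≤ (PySem.Chars.strip pat).length := by
    have := ‹PySem.Chars.startswith (PySem.Chars.strip pat) ['/', '/'] = true›
    rw [PySem.Chars.startswith_iff] at this
    simpa using this.length_le
  simp only [List.length_drop]; omega

def match_xpath_pattern_py (pattern : String) (path : String) : Bool :=
  pvMatchRecA pattern.toList path.toList

-- ===== PORT B =====
-- the while loop peeling the leading '//' marker: (remaining pattern, descend flag)
def pvPeelB (p : List Char) : List Char × Bool :=
  if PySem.Chars.startswith p ['/', '/'] then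
    ((pvPeelB (PySem.Chars.lstrip (p.drop 2))).1, true)
  else (p, false)
termination_by p.length
decreasing_by
  have h1 := pvLstripLenLe (p.drop 2)
  have h2 : 2 ≤ p.length := by
    have := ‹PySem.Chars.startswith p ['/', '/'] = true›
    rw [PySem.Chars.startswith_iff] at this
    simpa using this.length_le
  simp only [List.length_drop] at h1 ⊢; omega

def match_xpath_pattern_py_alt (pattern : String) (path : String) : Bool :=
  let r := pvPeelB (PySem.Chars.strip pattern.toList)
  let pats := pvToks r.1
  let Q := pvToks (PySem.Chars.strip path.toList)
  if r.2 then
    let k := pats.length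
    if ¬ (1 ≤ k ∧ k ≤ Q.length) then false
    else (pats.zip (Q.drop (Q.length - k))).all (fun pq => pvTokenMatch pq.1 pq.2)
  else
    if pats.length ≠ Q.length then false
    else (pats.zip Q).all (fun pq => pvTokenMatch pq.1 pq.2)

-- ===== PRECONDITION & SPEC =====
-- Pre_ excludes the corner where the stripped pattern begins with '//' and the last path token
-- ends in whitespace: A's rebuilt '/'.join path strings re-strip (or drop) that token while B
-- compares the tokens verbatim, and neither whitespace normalization is specified.
def Pre_match_xpath_pattern_py (pattern : String) (path : String) : Prop :=
  ¬ (PySem.Chars.startswith (PySem.Chars.strip pattern.toList) ['/', '/'] = true ∧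
     (match ((PySem.Chars.splitOn (PySem.Chars.strip path.toList) ['/']).filter
         (fun p => p ≠ [])).getLast? with
      | some t => (match t.getLast? with
        | some c => PySem.Chars.isspace c
        | none => false)
      | none => false) = true)
instance (pattern : String) (path : String) : Decidable (Pre_match_xpath_pattern_py pattern path) := by unfold Pre_match_xpath_pattern_py; infer_instance

def pvWitness_match_xpath_pattern_py : String × String := ("a/*/c[2]", "a/b[1]/c[2]")

def Spec_match_xpath_pattern_py (pattern : String) (path : String) (out : Bool) : Prop := out = match_xpath_pattern_py_alt pattern path
instance (pattern : String) (path : String) (out : Bool) : Decidable (Spec_match_xpath_pattern_py pattern path out) := by unfold Spec_match_xpath_pattern_py; infer_instance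

-- ===== CLAIM (what is proved, stated in full; the proofs are below) =====
def Claim_equal_match_xpath_pattern_py : Prop := ∀ (pattern : String) (path : String), Dom_match_xpath_pattern_py pattern path → Pre_match_xpath_pattern_py pattern path → Spec_match_xpath_pattern_py pattern path (match_xpath_pattern_py pattern path)

-- ===== LEMMAS AND PROOFS =====

-- specification of PySem.Chars.splitOn with a single-character separator
def pvSplit (x : Char) (pre : List Char) : List Char → List (List Char)
  | [] => [pre]
  | c :: s => if c = x then pre :: pvSplit x [] s else pvSplit x (pre ++ [c]) s

theorem pvGoSpec (x : Char) (fuel : Nat) (l cur : List Char) (acc : List (List Char))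
    (h : l.length < fuel) :
    PySem.Chars.splitOn.go [x] fuel l cur acc = acc.reverse ++ pvSplit x cur.reverse l := by
  induction fuel generalizing l cur acc with
  | zero => omega
  | succ fuel ih =>
    cases l with
    | nil => simp [PySem.Chars.splitOn.go, pvSplit]
    | cons c rest =>
      rw [PySem.Chars.splitOn.go]
      simp only [List.length_cons] at h
      by_cases hc : c = x
      · subst hc
        have hp : [c].isPrefixOf (c :: rest) = true := by simp [List.isPrefixOf]
        rw [hp]
        simp only [if_true, List.length_cons, List.length_nil, List.drop_succ_cons, List.drop_zero]
        rw [ih rest [] (cur.reverse :: acc) (by omega)]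
        simp [pvSplit]
      · have hp : [x].isPrefixOf (c :: rest) = false := by
          simp [List.isPrefixOf]; exact fun hh => (hc hh.symm).elim
        rw [hp]
        simp only [Bool.false_eq_true, ite_false]
        rw [ih rest (c :: cur) acc (by omega)]
        simp [pvSplit, hc]

theorem pvSplitOnEq (x : Char) (l : List Char) :
    PySem.Chars.splitOn l [x] = pvSplit x [] l := by
  rw [PySem.Chars.splitOn, pvGoSpec x _ _ _ _ (by omega)]; simp

theorem pvSplit_sep (x : Char) (pre s : List Char) :
    pvSplit x pre (x :: s) = pre :: pvSplit x [] s := by simp [pvSplit]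

theorem pvSplit_nosep (x : Char) (q : List Char) (hx : x ∉ q) :
    ∀ pre s, pvSplit x pre (q ++ s) = pvSplit x (pre ++ q) s := by
  induction q with
  | nil => simp
  | cons c q ih =>
    intro pre s
    have hcx : ¬ c = x := fun h => hx (h ▸ List.mem_cons_self)
    simp only [List.cons_append, pvSplit, if_neg hcx]
    rw [ih (fun h => hx (List.mem_cons_of_mem _ h)) (pre ++ [c]) s]
    simp

theorem pvSplit_mem (x : Char) (s : List Char) :
    ∀ pre t, t ∈ pvSplit x pre s → x ∉ pre → x ∉ t := by
  induction s with
  | nil => intro pre t ht hp; simp [pvSplit] at ht; subst ht; exact hp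
  | cons c s ih =>
    intro pre t ht hp
    by_cases hc : c = x
    · subst hc
      rw [pvSplit_sep] at ht
      rcases List.mem_cons.mp ht with h | h
      · subst h; exact hp
      · exact ih [] t h (by simp)
    · simp only [pvSplit, if_neg hc] at ht
      exact ih (pre ++ [c]) t ht (by
        intro hm
        rcases List.mem_append.mp hm with h | h
        · exact hp h
        · simp at h; exact hc h.symm)

theorem pvToks_mem (s : List Char) (t : List Char) (ht : t ∈ pvToks s) :
    t ≠ [] ∧ '/' ∉ t := by
  unfold pvToks at ht
  rw [pvSplitOnEq] at ht
  have h1 := List.of_mem_filter ht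
  have h2 := List.mem_of_mem_filter ht
  refine ⟨by simpa using h1, pvSplit_mem '/' s [] t h2 (by simp)⟩

theorem pvJoin_concat (s q : List Char) (Q : List (List Char)) (h : Q ≠ []) :
    PySem.Chars.join s (Q ++ [q]) = PySem.Chars.join s Q ++ s ++ q := by
  induction Q with
  | nil => simp at h
  | cons a Q ih =>
    cases Q with
    | nil => simp [PySem.Chars.join_singleton, PySem.Chars.join_cons_cons]
    | cons b Q =>
      rw [show (a :: b :: Q) ++ [q] = a :: b :: (Q ++ [q]) by simp, PySem.Chars.join_cons_cons]
      rw [show b :: (Q ++ [q]) = (b :: Q) ++ [q] by simp, ih (by simp), PySem.Chars.join_cons_cons]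
      simp [List.append_assoc]

theorem pvSplit_join (Q : List (List Char)) (h : ∀ t ∈ Q, '/' ∉ t) :
    pvSplit '/' [] (PySem.Chars.join ['/'] Q) = if Q = [] then [[]] else Q := by
  induction Q with
  | nil => simp [PySem.Chars.join_nil, pvSplit]
  | cons q Q ih =>
    cases Q with
    | nil =>
      rw [PySem.Chars.join_singleton]
      have := pvSplit_nosep '/' q (h q (by simp)) [] []
      simpa [pvSplit] using this
    | cons b Q =>
      rw [PySem.Chars.join_cons_cons, List.append_assoc,
        pvSplit_nosep '/' q (h q (by simp)) [] _]
      simp only [List.nil_append, List.singleton_append, pvSplit_sep]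
      rw [ih (fun t htm => h t (List.mem_cons_of_mem _ htm))]
      simp

theorem pvToks_join (Q : List (List Char)) (h : ∀ t ∈ Q, t ≠ [] ∧ '/' ∉ t) :
    pvToks ('/' :: PySem.Chars.join ['/'] Q) = Q := by
  unfold pvToks
  rw [pvSplitOnEq, pvSplit_sep, pvSplit_join Q (fun t ht => (h t ht).2)]
  have hf : Q.filter (fun p => p ≠ []) = Q :=
    List.filter_eq_self.mpr (fun a ha => by simpa using (h a ha).1)
  by_cases hQ : Q = []
  · subst hQ; simp
  · rw [if_neg hQ, List.filter_cons_of_neg (by simp)]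
    exact hf

theorem pvRstrip_append_pos (a b : List Char) (h : PySem.Chars.rstrip b ≠ []) :
    PySem.Chars.rstrip (a ++ b) = a ++ PySem.Chars.rstrip b := by
  unfold PySem.Chars.rstrip at *
  rw [List.reverse_append, List.dropWhile_append]
  have : (b.reverse.dropWhile PySem.Chars.isspace).isEmpty = false := by
    cases hb : b.reverse.dropWhile PySem.Chars.isspace with
    | nil => exact absurd (by rw [hb]; rfl) h
    | cons x xs => rfl
  rw [this]
  simp

theorem pvRstrip_append_nil (a b : List Char) (h : PySem.Chars.rstrip b = []) :
    PySem.Chars.rstrip (a ++ b) = PySem.Chars.rstrip a := by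
  unfold PySem.Chars.rstrip at *
  rw [List.reverse_append, List.dropWhile_append]
  have : (b.reverse.dropWhile PySem.Chars.isspace).isEmpty = true := by
    have := congrArg List.reverse h
    simp only [List.reverse_reverse, List.reverse_nil] at this
    rw [this]; rfl
  rw [this]
  simp

theorem pvRstrip_subset (l : List Char) : PySem.Chars.rstrip l ⊆ l := by
  unfold PySem.Chars.rstrip
  intro x hx
  simp only [List.mem_reverse] at hx
  have := (List.dropWhile_sublist (l := l.reverse) (p := PySem.Chars.isspace)).subset hx
  simpa using this

theorem pvRstrip_slash_cons (q : List Char) : PySem.Chars.rstrip ('/' :: q) ≠ [] := by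
  rw [show ('/' :: q) = ['/'] ++ q by simp]
  by_cases h : PySem.Chars.rstrip q = []
  · rw [pvRstrip_append_nil _ _ h]; decide
  · rw [pvRstrip_append_pos _ _ h]; simp

theorem pvLstrip_slash (s : List Char) : PySem.Chars.lstrip ('/' :: s) = '/' :: s := by
  unfold PySem.Chars.lstrip
  rw [List.dropWhile_cons_of_neg (by decide)]

-- the token-list effect of A's rebuild-and-re-strip of the path: rstrip the last token,
-- dropping it when it becomes empty
def pvProc (parts : List (List Char)) : List (List Char) :=
  match parts.getLast? with
  | none => parts
  | some q =>
    let t := PySem.Chars.rstrip q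
    parts.dropLast ++ (if t = [] then [] else [t])

theorem pvProc_nil : pvProc [] = [] := rfl

theorem pvProc_concat (Q : List (List Char)) (q : List Char) :
    pvProc (Q ++ [q]) =
      Q ++ (if PySem.Chars.rstrip q = [] then [] else [PySem.Chars.rstrip q]) := by
  unfold pvProc
  rw [List.getLast?_concat]
  simp only [List.dropLast_concat]

theorem pvProc_len_le (Q : List (List Char)) : (pvProc Q).length ≤ Q.length := by
  rcases List.eq_nil_or_concat Q with h | ⟨Q', q, h⟩
  · subst h; simp [pvProc_nil]
  · subst h
    rw [show Q'.concat q = Q' ++ [q] from List.concat_eq_append .., pvProc_concat]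
    by_cases hr : PySem.Chars.rstrip q = [] <;> simp [hr]

-- the key string fact: re-splitting A's rebuilt path '/' + '/'.join(Q) after strip
-- yields exactly the processed token list pvProc Q
theorem pvStrip_join (Q : List (List Char)) (hwf : ∀ t ∈ Q, t ≠ [] ∧ '/' ∉ t) (hne : Q ≠ []) :
    pvToks (PySem.Chars.strip ('/' :: PySem.Chars.join ['/'] Q)) = pvProc Q := by
  unfold PySem.Chars.strip
  rw [pvLstrip_slash]
  rcases List.eq_nil_or_concat Q with h | ⟨Q', q, h⟩
  · exact absurd h hne
  subst h
  rw [show Q'.concat q = Q' ++ [q] from List.concat_eq_append ..] at hwf ⊢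
  have hq := hwf q (by simp)
  have hrs : '/' ∉ PySem.Chars.rstrip q := fun hm => hq.2 (pvRstrip_subset q hm)
  cases Q' with
  | nil =>
    simp only [List.nil_append]
    rw [PySem.Chars.join_singleton, show ('/' :: q) = ['/'] ++ q by simp]
    have hp := pvProc_concat [] q
    simp only [List.nil_append] at hp
    by_cases hr : PySem.Chars.rstrip q = []
    · rw [pvRstrip_append_nil _ _ hr, hp]
      simp only [hr, if_true]
      rw [show PySem.Chars.rstrip ['/'] = ['/'] by decide]
      simp [pvToks, pvSplitOnEq, pvSplit]
    · rw [pvRstrip_append_pos _ _ hr, hp, if_neg hr]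
      rw [show (['/'] ++ PySem.Chars.rstrip q) = '/' :: PySem.Chars.join ['/'] [PySem.Chars.rstrip q] by
        rw [PySem.Chars.join_singleton]; simp]
      rw [pvToks_join [PySem.Chars.rstrip q] (by simpa using ⟨hr, hrs⟩)]
  | cons a Q'' =>
    have hQ' : (a :: Q'') ≠ [] := by simp
    rw [pvJoin_concat _ _ _ hQ']
    rw [show '/' :: (PySem.Chars.join ['/'] (a :: Q'') ++ ['/'] ++ q)
        = ('/' :: PySem.Chars.join ['/'] (a :: Q'')) ++ ('/' :: q) by simp]
    have hr2 := pvRstrip_slash_cons q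
    rw [pvRstrip_append_pos _ _ hr2, pvProc_concat]
    rw [show ('/' :: q) = ['/'] ++ q by simp]
    by_cases hr : PySem.Chars.rstrip q = []
    · rw [pvRstrip_append_nil _ _ hr, if_pos hr]
      rw [show PySem.Chars.rstrip ['/'] = ['/'] by decide]
      rw [show ('/' :: PySem.Chars.join ['/'] (a :: Q'')) ++ ['/']
          = '/' :: PySem.Chars.join ['/'] ((a :: Q'') ++ [[]]) by
        rw [pvJoin_concat _ _ _ hQ']; simp]
      unfold pvToks
      rw [pvSplitOnEq, pvSplit_sep, pvSplit_join _ (by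
        intro t ht
        rcases List.mem_append.mp ht with h | h
        · exact (hwf t (List.mem_append_left _ h)).2
        · simp at h; subst h; simp)]
      rw [if_neg (by simp)]
      rw [List.filter_cons_of_neg (by simp), List.filter_append]
      rw [List.filter_eq_self.mpr (fun t ht => by
        simpa using (hwf t (List.mem_append_left _ ht)).1)]
      simp
    · rw [pvRstrip_append_pos _ _ hr, if_neg hr]
      rw [show ('/' :: PySem.Chars.join ['/'] (a :: Q'')) ++ (['/'] ++ PySem.Chars.rstrip q)
          = '/' :: PySem.Chars.join ['/'] ((a :: Q'') ++ [PySem.Chars.rstrip q]) by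
        rw [pvJoin_concat _ _ _ hQ']; simp]
      rw [pvToks_join _ (by
        intro t ht
        rcases List.mem_append.mp ht with h | h
        · exact hwf t (List.mem_append_left _ h)
        · simp at h; subst h; exact ⟨hr, hrs⟩)]

theorem pvProc_drop (Q : List (List Char)) (i : Nat) :
    pvProc (Q.drop i) = (pvProc Q).drop i := by
  rcases List.eq_nil_or_concat Q with h | ⟨Q', q, h⟩
  · subst h; simp [pvProc_nil]
  subst h
  rw [show Q'.concat q = Q' ++ [q] from List.concat_eq_append ..]
  by_cases hi : i ≤ Q'.length
  · rw [List.drop_append_of_le_length hi, pvProc_concat, pvProc_concat,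
      List.drop_append_of_le_length hi]
  · have h1 : (Q' ++ [q]).length ≤ i := by simp; omega
    rw [List.drop_eq_nil_of_le h1, pvProc_nil, pvProc_concat]
    have h2 : (Q' ++ if PySem.Chars.rstrip q = [] then [] else [PySem.Chars.rstrip q]).length ≤ i := by
      by_cases hr : PySem.Chars.rstrip q = [] <;> simp [hr] <;> omega
    rw [List.drop_eq_nil_of_le h2]

def pvIter : Nat → List (List Char) → List (List Char)
  | 0, Q => Q
  | (j+1), Q => pvIter j (pvProc Q)

theorem pvIter_succ_out (j : Nat) (Q : List (List Char)) :
    pvIter (j+1) Q = pvProc (pvIter j Q) := by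
  induction j generalizing Q with
  | zero => rfl
  | succ j ih => exact ih (pvProc Q)

theorem pvIter_len_anti (Q : List (List Char)) {j j' : Nat} (h : j ≤ j') :
    (pvIter j' Q).length ≤ (pvIter j Q).length := by
  induction j' with
  | zero => simpa [Nat.le_zero.mp h]
  | succ j' ih =>
    rcases Nat.lt_or_ge j (j'+1) with hlt | hge
    · exact le_trans (by rw [pvIter_succ_out]; exact pvProc_len_le _) (ih (by omega))
    · have : j = j' + 1 := by omega
      subst this; rfl

theorem pvIter_drop (j : Nat) (Q : List (List Char)) (i : Nat) :
    pvIter j ((pvProc Q).drop i) = (pvIter (j+1) Q).drop i := by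
  induction j generalizing Q with
  | zero => rfl
  | succ j ih =>
    show pvIter j (pvProc ((pvProc Q).drop i)) = (pvIter (j+2) Q).drop i
    rw [pvProc_drop, ih (pvProc Q)]
    rfl

-- A's '//' recursion expressed as a closed form on token lists: the '//' depth d, the peeled
-- pattern tokens X and the path tokens Q determine the result (proved in pvMain below)
def pvBLoop (cur : List (List Char)) (d : Nat) : Option (List (List Char) × List (List Char)) :=
  match d with
  | 0 => none
  | 1 => if cur = [] then none else some (cur, pvProc cur)
  | (d' + 2) => if cur = [] then none else pvBLoop (pvProc cur) (d' + 1)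

-- A's strip-based peeling of leading '//' groups: (remaining pattern, depth)
def pvPeel (p : List Char) : List Char × Nat :=
  if PySem.Chars.startswith p ['/', '/'] then
    let r := pvPeel (PySem.Chars.strip (p.drop 2))
    (r.1, r.2 + 1)
  else (p, 0)
termination_by p.length
decreasing_by
  have h1 := pvStripLenLe (p.drop 2)
  have h2 : 2 ≤ p.length := by
    have := ‹PySem.Chars.startswith p ['/', '/'] = true›
    rw [PySem.Chars.startswith_iff] at this
    simpa using this.length_le
  simp only [List.length_drop] at h1 ⊢; omega

def pvMatchTokens (pats : List (List Char)) (depth : Nat) (Q : List (List Char)) : Bool :=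
  let k := pats.length
  if depth = 0 then
    (k == Q.length) && (pats.zip Q).all (fun pq => pvTokenMatch pq.1 pq.2)
  else
    match pvBLoop Q depth with
    | none => false
    | some (prev, cur) =>
      let s : Int := (cur.length : Int) - (k : Int)
      if s < 0 || (prev.length : Int) - 1 < s then false
      else (pats.zip (cur.drop s.toNat)).all (fun pq => pvTokenMatch pq.1 pq.2)

theorem pvBLoop_spec (d : Nat) (Q : List (List Char)) :
    pvBLoop Q (d+1) = if (∀ j, j < d+1 → pvIter j Q ≠ []) then
      some (pvIter d Q, pvIter (d+1) Q) else none := by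
  induction d generalizing Q with
  | zero =>
    show (if Q = [] then none else some (Q, pvProc Q)) = _
    by_cases hQ : Q = []
    · rw [if_pos hQ, if_neg (by push_neg; exact ⟨0, by omega, by simpa [pvIter] using hQ⟩)]
    · rw [if_neg hQ, if_pos (by intro j hj; interval_cases j; simpa [pvIter] using hQ)]
      rfl
  | succ d ih =>
    show (if Q = [] then none else pvBLoop (pvProc Q) (d+1)) = _
    by_cases hQ : Q = []
    · rw [if_pos hQ, if_neg (by push_neg; exact ⟨0, by omega, by simpa [pvIter] using hQ⟩)]
    · rw [if_neg hQ, ih (pvProc Q)]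
      have hiter : ∀ j, pvIter j (pvProc Q) = pvIter (j+1) Q := fun j => rfl
      by_cases hall : ∀ j, j < d+2 → pvIter j Q ≠ []
      · rw [if_pos (by intro j hj; rw [hiter]; exact hall (j+1) (by omega)), if_pos hall]
        rw [hiter, hiter]
      · rw [if_neg (by
          intro hc
          apply hall
          intro j hj
          cases j with
          | zero => simpa [pvIter] using hQ
          | succ j => rw [← hiter]; exact hc j (by omega)), if_neg hall]

def pvZipAll (X R : List (List Char)) : Bool :=
  (X.zip R).all (fun pq => pvTokenMatch pq.1 pq.2)

theorem pvMatchFrom_spec (pats Q : List (List Char)) (hp : ∀ t ∈ pats, t ≠ ['/', '/']) :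
    ∀ n ipat ipath, pats.length - ipat ≤ n → ipath ≤ Q.length →
    pvMatchFrom pats Q ipat ipath =
      (decide ((pats.drop ipat).length = (Q.drop ipath).length) &&
        pvZipAll (pats.drop ipat) (Q.drop ipath)) := by
  intro n
  induction n with
  | zero =>
    intro ipat ipath h1 h2
    have hge : pats.length ≤ ipat := by omega
    rw [pvMatchFrom, dif_neg (by omega)]
    rw [List.drop_eq_nil_of_le hge]
    simp only [List.length_nil, List.length_drop, pvZipAll, List.zip_nil_left, List.all_nil,
      Bool.and_true]
    have : ipath = Q.length ↔ (0 = Q.length - ipath) := by omega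
    simp [this]
  | succ n ih =>
    intro ipat ipath h1 h2
    by_cases hlt : ipat < pats.length
    · rw [pvMatchFrom, dif_pos hlt]
      have hpart : pats.getD ipat [] = pats[ipat] := List.getD_eq_getElem pats [] hlt
      have hne : pats.getD ipat [] ≠ ['/', '/'] := by
        rw [hpart]; exact hp _ (List.getElem_mem hlt)
      rw [if_neg hne]
      have hdp : pats.drop ipat = pats[ipat] :: pats.drop (ipat+1) :=
        List.drop_eq_getElem_cons hlt
      by_cases hq : Q.length ≤ ipath
      · rw [if_pos hq]
        have : ipath = Q.length := by omega
        subst this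
        rw [List.drop_length, hdp]
        simp
        omega
      · rw [if_neg hq]
        have hqlt : ipath < Q.length := by omega
        have hdq : Q.drop ipath = Q[ipath] :: Q.drop (ipath+1) :=
          List.drop_eq_getElem_cons hqlt
        have hqd : Q.getD ipath [] = Q[ipath] := List.getD_eq_getElem Q [] hqlt
        by_cases htm : pvTokenMatch pats[ipat] Q[ipath] = true
        · rw [if_neg (by rw [hpart, hqd]; simp [htm]), ih (ipat+1) (ipath+1) (by omega) (by omega)]
          rw [hdp, hdq]
          simp only [pvZipAll, List.zip_cons_cons, List.all_cons, List.length_cons, htm,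
            Bool.true_and, Nat.add_left_inj]
        · rw [if_pos (by rw [hpart, hqd]; simpa using htm)]
          rw [hdp, hdq]
          simp only [pvZipAll, List.zip_cons_cons, List.all_cons]
          simp [htm]
    · exact ih ipat ipath (by omega) h2

theorem pvZipAll_of_len_zero (X R : List (List Char)) (h : X.length = 0) :
    pvZipAll X R = true := by
  rw [List.length_eq_zero_iff.mp h]; rfl

theorem pvPeel_pos (p : List Char) (h : PySem.Chars.startswith p ['/', '/'] = true) :
    pvPeel p = ((pvPeel (PySem.Chars.strip (p.drop 2))).1,
                (pvPeel (PySem.Chars.strip (p.drop 2))).2 + 1) := by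
  rw [pvPeel]; simp [h]

theorem pvPeel_neg (p : List Char) (h : PySem.Chars.startswith p ['/', '/'] = false) :
    pvPeel p = (p, 0) := by
  rw [pvPeel]; simp [h]

theorem pvMatchTokens_zero (X Q : List (List Char)) :
    pvMatchTokens X 0 Q = ((X.length == Q.length) && pvZipAll X Q) := by
  unfold pvMatchTokens; rw [if_pos rfl]; rfl

theorem pvMatchTokens_none (X Q : List (List Char)) (depth : Nat) (hd : depth ≠ 0)
    (hb : pvBLoop Q depth = none) : pvMatchTokens X depth Q = false := by
  unfold pvMatchTokens; rw [if_neg hd, hb]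

theorem pvMatchTokens_some (X Q prev cur : List (List Char)) (depth : Nat) (hd : depth ≠ 0)
    (hb : pvBLoop Q depth = some (prev, cur)) :
    pvMatchTokens X depth Q =
      (if ((cur.length : Int) - (X.length : Int) < 0 ∨
            (prev.length : Int) - 1 < (cur.length : Int) - (X.length : Int))
       then false
       else pvZipAll X (cur.drop ((cur.length : Int) - (X.length : Int)).toNat)) := by
  unfold pvMatchTokens
  rw [if_neg hd, hb]
  show (if (decide _ || decide _) = true then _ else _) = _
  by_cases h1 : (cur.length : Int) - (X.length : Int) < 0
  · rw [if_pos (by simp [h1]), if_pos (Or.inl h1)]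
  · by_cases h2 : (prev.length : Int) - 1 < (cur.length : Int) - (X.length : Int)
    · rw [if_pos (by simp [h1, h2]), if_pos (Or.inr h2)]
    · rw [if_neg (by simp [h1, h2]), if_neg (by tauto)]
      rfl

theorem pvDropNeNil (l : List (List Char)) (i : Nat) (h : i < l.length) : l.drop i ≠ [] := by
  simp [List.drop_eq_nil_iff]; omega

-- the central unrolling: one '//' level of the closed form equals A's suffix scan
theorem pvUnroll (X : List (List Char)) (d : Nat) (Q : List (List Char)) :
    pvMatchTokens X (d+1) Q =
      (List.range Q.length).any (fun i => pvMatchTokens X d ((pvProc Q).drop i)) := by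
  have hone : pvIter 1 Q = pvProc Q := rfl
  by_cases hall : ∀ j, j < d+1 → pvIter j Q ≠ []
  · have hb : pvBLoop Q (d+1) = some (pvIter d Q, pvIter (d+1) Q) := by
      rw [pvBLoop_spec, if_pos hall]
    have hQ : Q ≠ [] := fun h => (hall 0 (by omega)) (by simpa [pvIter] using h)
    rw [pvMatchTokens_some X Q _ _ (d+1) (by omega) hb, Bool.eq_iff_iff]
    simp only [List.any_eq_true, List.mem_range]
    cases d with
    | zero =>
      have hm10 : (pvIter 1 Q).length ≤ Q.length := by
        rw [hone]; exact pvProc_len_le Q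
      constructor
      · intro hL
        split_ifs at hL with hc
        rw [not_or] at hc
        obtain ⟨hc1, hc2⟩ := hc
        rw [show pvIter (0+1) Q = pvIter 1 Q from rfl] at hc1 hc2 hL
        rw [show pvIter 0 Q = Q from rfl] at hc2
        have ht : (((pvIter 1 Q).length : Int) - (X.length : Int)).toNat
            = (pvIter 1 Q).length - X.length := by omega
        rw [ht] at hL
        refine ⟨(pvIter 1 Q).length - X.length, by omega, ?_⟩
        rw [pvMatchTokens_zero, ← hone, Bool.and_eq_true]
        exact ⟨by simp only [List.length_drop, beq_iff_eq]; omega, hL⟩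
      · rintro ⟨i, him, hin⟩
        rw [pvMatchTokens_zero, ← hone, Bool.and_eq_true] at hin
        obtain ⟨hlen, hzip⟩ := hin
        simp only [List.length_drop, beq_iff_eq] at hlen
        rw [show pvIter (0+1) Q = pvIter 1 Q from rfl, show pvIter 0 Q = Q from rfl]
        split_ifs with hc
        · exfalso; rcases hc with hc | hc <;> omega
        · rw [not_or] at hc
          by_cases hi1 : i ≤ (pvIter 1 Q).length
          · have ht : (((pvIter 1 Q).length : Int) - (X.length : Int)).toNat = i := by omega
            rwa [ht]
          · exact pvZipAll_of_len_zero X _ (by omega)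
    | succ d' =>
      have hmp0 : (pvIter (d'+1) Q).length ≤ Q.length := pvIter_len_anti (j := 0) (j' := d'+1) Q (by omega)
      have hmcp : (pvIter (d'+1+1) Q).length ≤ (pvIter (d'+1) Q).length := by
        rw [pvIter_succ_out]; exact pvProc_len_le _
      constructor
      · intro hL
        split_ifs at hL with hc
        rw [not_or] at hc
        obtain ⟨hc1, hc2⟩ := hc
        set mc := (pvIter (d'+1+1) Q).length with hmc
        set mp := (pvIter (d'+1) Q).length with hmp
        refine ⟨mc - X.length, by omega, ?_⟩
        have hinall : ∀ j, j < d'+1 → pvIter j ((pvProc Q).drop (mc - X.length)) ≠ [] := by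
          intro j hj
          rw [pvIter_drop]
          apply pvDropNeNil
          have := pvIter_len_anti Q (show j+1 ≤ d'+1 by omega)
          omega
        have hb' : pvBLoop ((pvProc Q).drop (mc - X.length)) (d'+1) =
            some ((pvIter (d'+1) Q).drop (mc - X.length),
                  (pvIter (d'+1+1) Q).drop (mc - X.length)) := by
          rw [pvBLoop_spec, if_pos hinall, pvIter_drop, pvIter_drop]
        rw [pvMatchTokens_some _ _ _ _ _ (by omega) hb']
        rw [if_neg (by simp only [List.length_drop]; omega)]
        have ht : ((((pvIter (d'+1+1) Q).drop (mc - X.length)).length : Int)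
            - (X.length : Int)).toNat = 0 := by
          simp only [List.length_drop]; omega
        rw [ht, List.drop_drop]
        have ht2 : (((mc : Int) - (X.length : Int))).toNat = mc - X.length := by omega
        rw [ht2] at hL
        simpa using hL
      · rintro ⟨i, him, hin⟩
        by_cases hinall : ∀ j, j < d'+1 → pvIter j ((pvProc Q).drop i) ≠ []
        · have hb' : pvBLoop ((pvProc Q).drop i) (d'+1) =
              some ((pvIter (d'+1) Q).drop i, (pvIter (d'+1+1) Q).drop i) := by
            rw [pvBLoop_spec, if_pos hinall, pvIter_drop, pvIter_drop]
          rw [pvMatchTokens_some _ _ _ _ _ (by omega) hb'] at hin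
          split_ifs at hin with hc
          rw [not_or] at hc
          obtain ⟨hc1, hc2⟩ := hc
          simp only [List.length_drop] at hc1 hc2
          have hip : i < (pvIter (d'+1) Q).length := by
            have h1 := hinall d' (by omega)
            rw [pvIter_drop] at h1
            rcases Nat.lt_or_ge i (pvIter (d'+1) Q).length with h | h
            · exact h
            · exact absurd (List.drop_eq_nil_of_le h) h1
          rw [List.drop_drop] at hin
          simp only [List.length_drop] at hin
          set mc := (pvIter (d'+1+1) Q).length with hmc
          set mp := (pvIter (d'+1) Q).length with hmp
          rw [if_neg (by omega)]
          by_cases hik : i ≤ mc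
          · have ht : i + ((((mc - i : Nat)) : Int) - (X.length : Int)).toNat
                = ((mc : Int) - (X.length : Int)).toNat := by omega
            rwa [ht] at hin
          · exact pvZipAll_of_len_zero X _ (by omega)
        · have hb' : pvBLoop ((pvProc Q).drop i) (d'+1) = none := by
            rw [pvBLoop_spec, if_neg hinall]
          rw [pvMatchTokens_none _ _ _ (by omega) hb'] at hin
          simp at hin
  · have hbn : pvBLoop Q (d+1) = none := by rw [pvBLoop_spec, if_neg hall]
    rw [pvMatchTokens_none X Q (d+1) (by omega) hbn, Bool.eq_iff_iff]
    simp only [List.any_eq_true, List.mem_range, Bool.false_eq_true, false_iff, not_exists]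
    rintro i ⟨hi, hcontra⟩
    have hQ : Q ≠ [] := by intro h; rw [h] at hi; simp at hi
    obtain ⟨j, hj, hje⟩ : ∃ j, j < d+1 ∧ pvIter j Q = [] := by
      by_contra hc
      exact hall (fun j hjd hne => hc ⟨j, hjd, hne⟩)
    have hj0 : j ≠ 0 := fun h => hQ (by rwa [h] at hje)
    cases d with
    | zero => exact hQ (by interval_cases j <;> simp_all)
    | succ d' =>
      have hbn' : pvBLoop ((pvProc Q).drop i) (d'+1) = none := by
        rw [pvBLoop_spec, if_neg (by
          intro hin
          have := hin (j-1) (by omega)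
          rw [pvIter_drop, show j-1+1 = j by omega, hje] at this
          simp at this)]
      rw [pvMatchTokens_none _ _ _ (by omega) hbn'] at hcontra
      simp at hcontra

theorem pvNoDescend (pat path : List Char)
    (h : PySem.Chars.startswith (PySem.Chars.strip pat) ['/', '/'] = false) :
    pvMatchRecA pat path =
      pvMatchTokens (pvToks (pvPeel (PySem.Chars.strip pat)).1)
        ((pvPeel (PySem.Chars.strip pat)).2) (pvToks (PySem.Chars.strip path)) := by
  rw [pvMatchRecA]
  simp only [h, Bool.false_eq_true, if_false, pvPeel_neg _ h]
  rw [pvMatchTokens_zero]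
  have hp : ∀ t ∈ pvToks (PySem.Chars.strip pat), t ≠ ['/', '/'] :=
    fun t ht he => (pvToks_mem _ t ht).2 (by rw [he]; simp)
  rw [pvMatchFrom_spec _ _ hp (pvToks (PySem.Chars.strip pat)).length 0 0 (by omega) (by omega)]
  simp only [List.drop_zero]
  rw [Bool.beq_eq_decide_eq]
  rfl

-- A's result is the closed form on token lists
theorem pvMain : ∀ (n : Nat) (pat path : List Char), pat.length ≤ n →
    pvMatchRecA pat path =
      pvMatchTokens (pvToks (pvPeel (PySem.Chars.strip pat)).1)
        ((pvPeel (PySem.Chars.strip pat)).2) (pvToks (PySem.Chars.strip path)) := by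
  intro n
  induction n with
  | zero =>
    intro pat path hlen
    have hpat : pat = [] := List.length_eq_zero_iff.mp (by omega)
    subst hpat
    exact pvNoDescend [] path (by decide)
  | succ n ih =>
    intro pat path hlen
    by_cases hss : PySem.Chars.startswith (PySem.Chars.strip pat) ['/', '/'] = true
    · have hlen2 : 2 ≤ (PySem.Chars.strip pat).length := by
        have := hss
        rw [PySem.Chars.startswith_iff] at this
        simpa using this.length_le
      have hsub : ((PySem.Chars.strip pat).drop 2).length ≤ n := by
        have := pvStripLenLe pat
        simp only [List.length_drop]
        omega
      rw [pvMatchRecA]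
      simp only [hss, if_true, pvPeel_pos _ hss]
      rw [pvUnroll, Bool.eq_iff_iff]
      simp only [List.any_eq_true, List.mem_range]
      refine exists_congr fun i => and_congr_right fun hi => ?_
      rw [ih _ ('/' :: PySem.Chars.join ['/']
        ((pvToks (PySem.Chars.strip path)).drop i)) hsub]
      rw [pvStrip_join _ (fun t ht => pvToks_mem _ t (List.mem_of_mem_drop ht))
        (pvDropNeNil _ i hi), pvProc_drop]
    · exact pvNoDescend pat path (by simpa using hss)

-- ===== cleanliness: no trailing whitespace, relating strip/lstrip peeling and killing pvProc =====

def pvCleanP (q : List Char) : Prop :=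
  ∀ c, q.getLast? = some c → PySem.Chars.isspace c = false

theorem pvRstrip_of_clean (q : List Char) (h : pvCleanP q) : PySem.Chars.rstrip q = q := by
  unfold PySem.Chars.rstrip
  cases hq : q.reverse with
  | nil =>
    have hqnil : q = [] := by simpa using congrArg List.reverse hq
    simp [hqnil]
  | cons c l =>
    have hc : PySem.Chars.isspace c = false := h c (by rw [← List.head?_reverse, hq]; rfl)
    rw [List.dropWhile_cons_of_neg (by simp [hc])]
    rw [← hq, List.reverse_reverse]

theorem pvClean_rstrip (q : List Char) : pvCleanP (PySem.Chars.rstrip q) := by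
  intro c hc
  unfold PySem.Chars.rstrip at hc
  rw [← List.head?_reverse, List.reverse_reverse] at hc
  have := List.head?_dropWhile_not (p := PySem.Chars.isspace) (l := q.reverse)
  rw [hc] at this
  simpa using this

theorem pvClean_of_suffix (q t : List Char) (h : pvCleanP q) (hs : t <:+ q) : pvCleanP t := by
  intro c hc
  obtain ⟨a, rfl⟩ := hs
  apply h c
  rw [List.getLast?_append]
  rw [hc]
  rfl

theorem pvClean_strip (s : List Char) : pvCleanP (PySem.Chars.strip s) := by
  have : PySem.Chars.strip s = PySem.Chars.rstrip (PySem.Chars.lstrip s) := rfl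
  rw [this]
  exact pvClean_rstrip _

theorem pvClean_lstrip (q : List Char) (h : pvCleanP q) : pvCleanP (PySem.Chars.lstrip q) :=
  pvClean_of_suffix q _ h (by unfold PySem.Chars.lstrip; exact List.dropWhile_suffix _)

theorem pvClean_drop (q : List Char) (n : Nat) (h : pvCleanP q) : pvCleanP (q.drop n) :=
  pvClean_of_suffix q _ h (List.drop_suffix n q)

-- on rstrip-clean patterns the strip-based and lstrip-based peels agree
theorem pvPeelB_eq : ∀ (n : Nat) (p : List Char), p.length ≤ n → pvCleanP p →
    (pvPeelB p).1 = (pvPeel p).1 ∧ ((pvPeelB p).2 = true ↔ (pvPeel p).2 ≠ 0) := by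
  intro n
  induction n with
  | zero =>
    intro p hlen _
    have hp : p = [] := List.length_eq_zero_iff.mp (by omega)
    subst hp
    have hss : PySem.Chars.startswith [] ['/', '/'] = false := by decide
    rw [pvPeelB, pvPeel]
    simp [hss]
  | succ n ih =>
    intro p hlen hc
    by_cases hss : PySem.Chars.startswith p ['/', '/'] = true
    · have hlen2 : 2 ≤ p.length := by
        have := hss
        rw [PySem.Chars.startswith_iff] at this
        simpa using this.length_le
      have hcl : pvCleanP (PySem.Chars.lstrip (p.drop 2)) :=
        pvClean_lstrip _ (pvClean_drop p 2 hc)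
      have hstrip : PySem.Chars.strip (p.drop 2) = PySem.Chars.lstrip (p.drop 2) := by
        have : PySem.Chars.strip (p.drop 2)
            = PySem.Chars.rstrip (PySem.Chars.lstrip (p.drop 2)) := rfl
        rw [this, pvRstrip_of_clean _ hcl]
      have hlen3 : (PySem.Chars.lstrip (p.drop 2)).length ≤ n := by
        have := pvLstripLenLe (p.drop 2)
        simp only [List.length_drop] at this
        omega
      obtain ⟨h1, _⟩ := ih (PySem.Chars.lstrip (p.drop 2)) hlen3 hcl
      rw [pvPeelB, pvPeel]
      simp only [hss, if_true]
      refine ⟨?_, by simp⟩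
      rw [hstrip] at *
      exact h1
    · rw [pvPeelB, pvPeel]
      simp [hss]

-- under the Pre_ corner exclusion the path token list is a fixed point of pvProc
theorem pvProc_id_of_clean_last (Q : List (List Char))
    (hwf : ∀ t ∈ Q, t ≠ [])
    (h : (match Q.getLast? with
      | some t => (match t.getLast? with
        | some c => PySem.Chars.isspace c
        | none => false)
      | none => false) = false) : pvProc Q = Q := by
  unfold pvProc
  cases hQ : Q.getLast? with
  | none => rfl
  | some q =>
    have hqmem : q ∈ Q := List.mem_of_getLast? hQ
    have hqne : q ≠ [] := hwf q hqmem
    have h' : (match q.getLast? with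
        | some c => PySem.Chars.isspace c
        | none => false) = false := by rw [hQ] at h; exact h
    have hclean : pvCleanP q := by
      intro c hc
      rw [hc] at h'
      simpa using h'
    show Q.dropLast ++ (if PySem.Chars.rstrip q = [] then [] else [PySem.Chars.rstrip q]) = Q
    rw [pvRstrip_of_clean q hclean, if_neg hqne]
    have := List.dropLast_append_getLast? (l := Q) q hQ
    simpa using this

theorem pvIter_id (Q : List (List Char)) (h : pvProc Q = Q) : ∀ j, pvIter j Q = Q := by
  intro j
  induction j with
  | zero => rfl
  | succ j ih =>
    rw [pvIter_succ_out, ih, h]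

-- the closed form at positive depth with pvProc killed is B's suffix comparison
theorem pvMatchTokens_pos_clean (X Q : List (List Char)) (d : Nat) (h : pvProc Q = Q) :
    pvMatchTokens X (d+1) Q =
      (if ¬ (1 ≤ X.length ∧ X.length ≤ Q.length) then false
       else pvZipAll X (Q.drop (Q.length - X.length))) := by
  have hiter := pvIter_id Q h
  by_cases hQ : Q = []
  · have hbn : pvBLoop Q (d+1) = none := by
      rw [pvBLoop_spec, if_neg (by push_neg; exact ⟨0, by omega, by simpa [pvIter] using hQ⟩)]
    rw [pvMatchTokens_none _ _ _ (by omega) hbn]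
    subst hQ
    rw [if_pos (by rintro ⟨h1, h2⟩; simp only [List.length_nil] at h2; omega)]
  · have hb : pvBLoop Q (d+1) = some (Q, Q) := by
      rw [pvBLoop_spec, if_pos (by intro j _; rw [hiter j]; exact hQ)]
      rw [hiter d, hiter (d+1)]
    rw [pvMatchTokens_some _ _ _ _ _ (by omega) hb]
    have hQlen : 1 ≤ Q.length := by
      cases Q with
      | nil => exact absurd rfl hQ
      | cons a l => simp
    by_cases h1 : 1 ≤ X.length ∧ X.length ≤ Q.length
    · rw [if_neg (by omega), if_neg (by push_neg; exact h1)]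
      have : (((Q.length : Int) - (X.length : Int))).toNat = Q.length - X.length := by omega
      rw [this]
    · rw [if_pos h1]
      rw [if_pos (by omega)]

theorem pvAlt_unfold (pattern path : String) :
    match_xpath_pattern_py_alt pattern path =
      (if (pvPeelB (PySem.Chars.strip pattern.toList)).2 then
        (if ¬ (1 ≤ (pvToks (pvPeelB (PySem.Chars.strip pattern.toList)).1).length ∧
               (pvToks (pvPeelB (PySem.Chars.strip pattern.toList)).1).length
                 ≤ (pvToks (PySem.Chars.strip path.toList)).length)
         then false
         else ((pvToks (pvPeelB (PySem.Chars.strip pattern.toList)).1).zip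
             ((pvToks (PySem.Chars.strip path.toList)).drop
               ((pvToks (PySem.Chars.strip path.toList)).length -
                (pvToks (pvPeelB (PySem.Chars.strip pattern.toList)).1).length))).all
             (fun pq => pvTokenMatch pq.1 pq.2))
       else
        (if (pvToks (pvPeelB (PySem.Chars.strip pattern.toList)).1).length
             ≠ (pvToks (PySem.Chars.strip path.toList)).length then false
         else ((pvToks (pvPeelB (PySem.Chars.strip pattern.toList)).1).zip
             (pvToks (PySem.Chars.strip path.toList))).all
             (fun pq => pvTokenMatch pq.1 pq.2))) := rfl

-- ===== VERDICT (by name: the statement is the Claim_ definition above) =====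
theorem match_xpath_pattern_py_spec : Claim_equal_match_xpath_pattern_py := by
  unfold Claim_equal_match_xpath_pattern_py
  intro pattern path _ hpre
  unfold Pre_match_xpath_pattern_py at hpre
  unfold Spec_match_xpath_pattern_py match_xpath_pattern_py
  rw [pvAlt_unfold, pvMain pattern.toList.length pattern.toList path.toList le_rfl]
  obtain ⟨hB1, hB2⟩ := pvPeelB_eq (PySem.Chars.strip pattern.toList).length
    (PySem.Chars.strip pattern.toList) le_rfl (pvClean_strip _)
  rw [hB1]
  cases hd : (pvPeel (PySem.Chars.strip pattern.toList)).2 with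
  | zero =>
    have hb2 : (pvPeelB (PySem.Chars.strip pattern.toList)).2 = false := by
      rcases Bool.eq_false_or_eq_true (pvPeelB (PySem.Chars.strip pattern.toList)).2 with h | h
      · exact absurd hd (hB2.mp h)
      · exact h
    rw [hb2]
    simp only [Bool.false_eq_true, if_false]
    rw [pvMatchTokens_zero]
    by_cases hlen : (pvToks (pvPeel (PySem.Chars.strip pattern.toList)).1).length
        = (pvToks (PySem.Chars.strip path.toList)).length
    · rw [if_neg (by simpa using hlen)]
      simp [hlen, pvZipAll]
    · rw [if_pos (by simpa using hlen)]
      simp [hlen]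
  | succ d =>
    have hss : PySem.Chars.startswith (PySem.Chars.strip pattern.toList) ['/', '/'] = true := by
      rcases Bool.eq_false_or_eq_true
        (PySem.Chars.startswith (PySem.Chars.strip pattern.toList) ['/', '/']) with h | h
      · exact h
      · rw [pvPeel_neg _ h] at hd; simp at hd
    have hb2 : (pvPeelB (PySem.Chars.strip pattern.toList)).2 = true :=
      hB2.mpr (by rw [hd]; simp)
    rw [hb2]
    simp only [if_true]
    have hlast : (match ((PySem.Chars.splitOn (PySem.Chars.strip path.toList) ['/']).filter
         (fun p => p ≠ [])).getLast? with
      | some t => (match t.getLast? with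
        | some c => PySem.Chars.isspace c
        | none => false)
      | none => false) = false := by
      rcases Bool.eq_false_or_eq_true (match ((PySem.Chars.splitOn
          (PySem.Chars.strip path.toList) ['/']).filter (fun p => p ≠ [])).getLast? with
        | some t => (match t.getLast? with
          | some c => PySem.Chars.isspace c
          | none => false)
        | none => false) with h | h
      · exact absurd ⟨hss, h⟩ hpre
      · exact h
    have hproc : pvProc (pvToks (PySem.Chars.strip path.toList))
        = pvToks (PySem.Chars.strip path.toList) :=
      pvProc_id_of_clean_last _ (fun t ht => (pvToks_mem _ t ht).1) hlast
    rw [pvMatchTokens_pos_clean _ _ d hproc]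
    rfl
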